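-- pv_equiv track=rewrite | github.com/michaelgrace/text-to-video-ai | app/core/processors/caption_processor.py | splitWordsByChars
-- ===== SOURCE A (Python) =====
-- def splitWordsByChars(words, maxCaptionChars):  # Renamed for clarity
--     halfLength = maxCaptionChars / 2
--     captions = []
--     while words:
--         caption = words[0]
--         words = words[1:]
--         while words and len(caption + ' ' + words[0]) <= maxCaptionChars:
--             caption += ' ' + words[0]
--             words = words[1:]
--             if len(caption) >= halfLength and words:
--                 break
--         captions.append(caption)
--     return captions
-- ===== SOURCE B (Python) =====
-- def splitWordsByChars(words, maxCaptionChars):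
--     # Single pass with an index pointer: no repeated list slicing (O(n) vs A's O(n^2)).
--     captions = []
--     i = 0
--     n = len(words)
--     while i < n:
--         caption = words[i]
--         i += 1
--         while i < n and len(caption) + 1 + len(words[i]) <= maxCaptionChars:
--             caption += ' ' + words[i]
--             i += 1
--             if 2 * len(caption) >= maxCaptionChars:
--                 break
--         captions.append(caption)
--     return captions
-- ===== Notes on version B (the rewrite author's own statement) =====
-- stated objective: faster
-- what changed: Replaced the repeated list-slicing (words = words[1:]) rebuild of the word list with a single forward index pointer over the original list, turning the quadratic slicing cost into one linear pass.
import Mathlib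
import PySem

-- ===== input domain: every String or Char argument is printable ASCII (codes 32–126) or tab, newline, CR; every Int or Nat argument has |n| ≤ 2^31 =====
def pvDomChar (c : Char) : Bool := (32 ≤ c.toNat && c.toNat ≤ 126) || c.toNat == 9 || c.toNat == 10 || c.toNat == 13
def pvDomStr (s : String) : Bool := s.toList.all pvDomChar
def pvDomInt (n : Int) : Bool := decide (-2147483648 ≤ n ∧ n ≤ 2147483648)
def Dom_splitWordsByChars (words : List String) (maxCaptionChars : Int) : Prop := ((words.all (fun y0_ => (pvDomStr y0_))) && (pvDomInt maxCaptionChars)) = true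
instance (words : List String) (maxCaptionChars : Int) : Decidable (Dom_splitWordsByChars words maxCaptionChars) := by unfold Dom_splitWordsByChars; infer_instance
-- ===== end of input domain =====

-- B replaces A's repeated list slicing (words = words[1:]) with a single index pointer over the list (faster).
-- Both ports render Python's `len(caption) >= maxCaptionChars / 2` (float halving) as `2 * len(caption) ≥ maxCaptionChars`,
-- exact on the domain: |maxCaptionChars| ≤ 2^31, so maxCaptionChars/2 is an exact float and the int-vs-float comparison is exact.
-- B's loops run on an index pointer, so their ports carry a fuel counter (initially words.length, never exhausted) purely for totality.

-- ===== PORT A =====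
-- inner `while words and len(caption + ' ' + words[0]) <= maxCaptionChars:` loop of A,
-- returning the grown caption and the remaining (sliced) word list
def pvAInner (m : Int) : String → List String → String × List String
  | caption, [] => (caption, [])
  | caption, w :: rest =>
    if PySem.Str.len (caption ++ " " ++ w) ≤ m then
      if 2 * PySem.Str.len (caption ++ " " ++ w) ≥ m ∧ rest ≠ [] then   -- `if len(caption) >= halfLength and words: break`
        (caption ++ " " ++ w, rest)
      else pvAInner m (caption ++ " " ++ w) rest
    else (caption, w :: rest)

-- outer `while words:` loop of A; fuel (initially words.length) only makes the recursion structural: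
-- each iteration consumes at least one word, so fuel ≥ length of the list and the 0-fuel branch is never reached
def pvAOuter (m : Int) : Nat → List String → List String
  | _, [] => []
  | 0, _ :: _ => []
  | fuel + 1, w :: rest =>
    let p := pvAInner m w rest
    p.1 :: pvAOuter m fuel p.2

def splitWordsByChars (words : List String) (maxCaptionChars : Int) : List String :=
  pvAOuter maxCaptionChars words.length words

-- ===== PORT B =====
-- inner while of Source B: grows the caption, advancing the index pointer i over the fixed list;
-- fuel (≥ words.length - i throughout) only makes the recursion structural
def pvBInner (words : List String) (m : Int) : Nat → String → Nat → String × Nat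
  | 0, caption, i => (caption, i)
  | fuel + 1, caption, i =>
    if h : i < words.length then
      if PySem.Str.len caption + 1 + PySem.Str.len words[i] ≤ m then
        if 2 * PySem.Str.len (caption ++ " " ++ words[i]) ≥ m then (caption ++ " " ++ words[i], i + 1)
        else pvBInner words m fuel (caption ++ " " ++ words[i]) (i + 1)
      else (caption, i)
    else (caption, i)

-- outer `while i < n:` loop of Source B
def pvBOuter (words : List String) (m : Int) : Nat → Nat → List String
  | 0, _ => []
  | fuel + 1, i =>
    if h : i < words.length then
      let p := pvBInner words m (words.length - (i + 1)) words[i] (i + 1)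
      p.1 :: pvBOuter words m fuel p.2
    else []

def splitWordsByChars_alt (words : List String) (maxCaptionChars : Int) : List String :=
  pvBOuter words maxCaptionChars words.length 0

-- ===== PRECONDITION & SPEC =====
def Spec_splitWordsByChars (words : List String) (maxCaptionChars : Int) (out : List String) : Prop := out = splitWordsByChars_alt words maxCaptionChars
instance (words : List String) (maxCaptionChars : Int) (out : List String) : Decidable (Spec_splitWordsByChars words maxCaptionChars out) := by unfold Spec_splitWordsByChars; infer_instance

-- ===== CLAIM (what is proved, stated in full; the proofs are below) =====
def Claim_equal_splitWordsByChars : Prop := ∀ (words : List String) (maxCaptionChars : Int), Dom_splitWordsByChars words maxCaptionChars → Spec_splitWordsByChars words maxCaptionChars (splitWordsByChars words maxCaptionChars)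

-- ===== LEMMAS AND PROOFS =====

theorem pv_len_concat (a w : String) :
    PySem.Str.len (a ++ " " ++ w) = PySem.Str.len a + 1 + PySem.Str.len w := by
  simp; omega

theorem pvBInner_snd_ge (words : List String) (m : Int) :
    ∀ (fuel : Nat) (c : String) (i : Nat), i ≤ (pvBInner words m fuel c i).2 := by
  intro fuel
  induction fuel with
  | zero => intro c i; simp [pvBInner]
  | succ fuel ih =>
    intro c i
    rw [pvBInner]
    split_ifs with h1 h2 h3
    · omega
    · exact Nat.le_of_succ_le (ih _ (i + 1))
    · exact Nat.le_refl i
    · exact Nat.le_refl i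

-- B's inner loop at index i computes A's inner loop on the suffix words.drop i
theorem pvInner_key (words : List String) (m : Int) :
    ∀ (fuel : Nat) (i : Nat) (c : String), words.length - i ≤ fuel → i ≤ words.length →
      (pvBInner words m fuel c i).1 = (pvAInner m c (words.drop i)).1 ∧
      (pvBInner words m fuel c i).2 ≤ words.length ∧
      words.drop (pvBInner words m fuel c i).2 = (pvAInner m c (words.drop i)).2 := by
  intro fuel
  induction fuel with
  | zero =>
    intro i c hk hi
    have hi' : i = words.length := by omega
    simp [pvBInner, hi', pvAInner]
  | succ fuel ih =>
    intro i c hk hi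
    rcases Nat.lt_or_ge i words.length with h | h
    · have hdrop : words.drop i = words[i] :: words.drop (i + 1) := List.drop_eq_getElem_cons h
      rw [hdrop]
      rw [pvBInner]
      simp only [pvAInner, h, dif_pos, pv_len_concat]
      split_ifs with hfit hhalf hAnd hAnd
      · exact ⟨rfl, by omega, rfl⟩
      · -- caption reached half length but the rest is empty: A falls through to its inner loop on []
        have hnil : words.drop (i + 1) = [] := by tauto
        simp only [hnil, pvAInner]
        exact ⟨trivial, by omega, trivial⟩
      · exact absurd hAnd.1 hhalf
      · exact ih (i + 1) _ (by omega) (by omega)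
      · exact ⟨rfl, by omega, hdrop⟩
    · have hi' : i = words.length := by omega
      rw [pvBInner]
      simp [hi', pvAInner]

-- B's outer loop at index i computes A's outer loop on the suffix words.drop i
theorem pvOuter_key (words : List String) (m : Int) :
    ∀ (fuel : Nat) (i : Nat), words.length - i ≤ fuel →
      pvBOuter words m fuel i = pvAOuter m fuel (words.drop i) := by
  intro fuel
  induction fuel with
  | zero =>
    intro i hk
    have : words.drop i = [] := List.drop_eq_nil_of_le (by omega)
    simp [this, pvBOuter, pvAOuter]
  | succ fuel ih =>
    intro i hk
    rcases Nat.lt_or_ge i words.length with h | h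
    · have hdrop : words.drop i = words[i] :: words.drop (i + 1) := List.drop_eq_getElem_cons h
      obtain ⟨h1, h2, h3⟩ := pvInner_key words m (words.length - (i + 1)) (i + 1) words[i] (Nat.le_refl _) (by omega)
      have hge := pvBInner_snd_ge words m (words.length - (i + 1)) words[i] (i + 1)  -- i < next index: ih's bound
      rw [pvBOuter, hdrop]
      simp only [pvAOuter, h, dif_pos]
      rw [h1, ih _ (by omega), h3]
    · have : words.drop i = [] := List.drop_eq_nil_of_le (by omega)
      rw [pvBOuter]
      simp [this, pvAOuter, show ¬ i < words.length by omega]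

-- ===== VERDICT (by name: the statement is the Claim_ definition above) =====
theorem splitWordsByChars_spec : Claim_equal_splitWordsByChars := by
  intro words m _
  unfold Spec_splitWordsByChars splitWordsByChars splitWordsByChars_alt
  simpa using (pvOuter_key words m words.length 0 (by omega)).symm
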